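-- pv_equiv track=rewrite | github.com/fast-crypto-lab/Frobenius_AFFT | gf2_poly.py | pseq
-- ===== SOURCE A (Python) =====
-- def pseq(n):
--     if n==0:
--         return [0]
--     if n==1:
--         return [1]
--     s = [1]
--     j=0
--     for i in range(2,n+1):
--         if i-1==2**(j):
--             j+=1
--             s = [v*2 for v in s]
--         else:
--             s = [v*2 + a for v in s for a in [0,1]]
--     return s
-- ===== SOURCE B (Python) =====
-- def pseq(n):
--     # Enumerate the results directly: the top-bit base value plus every choice of
--     # the "free" bits (steps whose i-1 is not the next power of two), via a
--     # binary counter scattered onto the recorded bit significances.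
--     if n == 0:
--         return [0]
--     if n < 2:
--         return [1]      # fewer than two steps: only the seed value
--     sigs = []          # significances of the free bits, MSB first
--     p = 1              # next power of two in the schedule
--     for i in range(2, n + 1):
--         if i - 1 == p:
--             p *= 2
--         else:
--             sigs.append(n - i)
--     base = 1 << (n - 1)
--     res = []
--     for m in range(1 << len(sigs)):
--         v = base
--         mm = m
--         for sig in reversed(sigs):
--             if mm % 2 == 1:
--                 v += 1 << sig
--             mm //= 2
--         res.append(v)
--     return res
-- ===== Notes on version B (the rewrite author's own statement) =====
-- stated objective: alternative
-- what changed: A grows the list step by step, rewriting every element at each loop iteration (doubling or doubling-and-branching); B first records in one pass which bit positions are free and the significance of each, then directly enumerates a binary counter over the free bits and scatters its bits onto the top-bit base value.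
import Mathlib
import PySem

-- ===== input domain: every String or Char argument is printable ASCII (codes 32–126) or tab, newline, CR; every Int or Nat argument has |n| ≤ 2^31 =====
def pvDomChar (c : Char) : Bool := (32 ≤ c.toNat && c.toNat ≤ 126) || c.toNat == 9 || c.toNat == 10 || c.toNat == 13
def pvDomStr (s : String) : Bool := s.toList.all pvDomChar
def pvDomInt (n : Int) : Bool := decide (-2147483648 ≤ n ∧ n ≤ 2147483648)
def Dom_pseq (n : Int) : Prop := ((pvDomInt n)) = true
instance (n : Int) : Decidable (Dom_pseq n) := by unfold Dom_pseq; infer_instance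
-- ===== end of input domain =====

-- B replaces A's repeated list-expansion loop by a two-phase scheme (record free-bit
-- significances, then enumerate a binary counter scattered onto them); both are total and
-- the return values are proved equal on the whole domain.

-- ===== PORT A =====
-- loop state: (s, j); Python's j is a nonnegative counter, kept as Nat
def pseq (n : Int) : List Int :=
  if n = 0 then [0]
  else if n = 1 then [1]
  else
    ((PySem.List.pyRange 2 (n + 1) 1).foldl
      (fun (st : List Int × Nat) i =>
        if i - 1 = (2:Int) ^ st.2 then
          (st.1.map (fun v => v * 2), st.2 + 1)
        else
          (st.1.flatMap (fun v => [0, 1].map (fun a => v * 2 + a)), st.2))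
      ([1], 0)).1

-- ===== PORT B =====
-- phase 1 state: (sigs, p); `1 << e` is `1 <<< e.toNat` (e is provably ≥ 0 wherever reached)
def pseq_alt (n : Int) : List Int :=
  if n = 0 then [0]
  else if n < 2 then [1]
  else
    let sp := (PySem.List.pyRange 2 (n + 1) 1).foldl
      (fun (sp : List Int × Int) i =>
        if i - 1 = sp.2 then (sp.1, sp.2 * 2) else (sp.1 ++ [n - i], sp.2))
      ([], 1)
    let sigs := sp.1
    let base : Int := 1 <<< (n - 1).toNat
    (PySem.List.pyRange 0 (1 <<< sigs.length) 1).foldl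
      (fun res m =>
        res ++ [(sigs.reverse.foldl
          (fun (t : Int × Int) sig =>
            (if PySem.Int.mod t.2 2 = 1 then t.1 + (1 <<< sig.toNat) else t.1,
             PySem.Int.floordiv t.2 2))
          (base, m)).1])
      []

-- ===== PRECONDITION & SPEC =====
def Spec_pseq (n : Int) (out : List Int) : Prop := out = pseq_alt n
instance (n : Int) (out : List Int) : Decidable (Spec_pseq n out) := by unfold Spec_pseq; infer_instance

-- ===== CLAIM (what is proved, stated in full; the proofs are below) =====
def Claim_equal_pseq : Prop := ∀ (n : Int), Dom_pseq n → Spec_pseq n (pseq n)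

-- ===== LEMMAS AND PROOFS =====

-- the values produced by a list of free-bit significances (LSB-first), above base b
def EprN (b : Int) : List Nat → List Int
  | [] => [b]
  | s :: rest => (EprN b rest).flatMap (fun w => [w, w + 2 ^ s])

-- counter m scattered onto significances (LSB-first)
def scatN (m : Nat) : List Nat → Int
  | [] => 0
  | s :: rest => (if m % 2 = 1 then (2:Int) ^ s else 0) + scatN (m / 2) rest

-- the reference schedule: after steps 2..k+1, (relative sigs LSB-first, j)
def sched : Nat → List Nat × Nat
  | 0 => ([], 0)
  | k + 1 =>
    let rj := sched k
    if k + 1 = 2 ^ rj.2 then (rj.1.map (· + 1), rj.2 + 1)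
    else (0 :: rj.1.map (· + 1), rj.2)

theorem pv_range_two_mul (k : Nat) :
    List.range (2 * k) = (List.range k).flatMap (fun q => [2 * q, 2 * q + 1]) := by
  induction k with
  | zero => simp
  | succ k ih =>
      have h : 2 * (k + 1) = (2 * k + 1) + 1 := by omega
      rw [h, List.range_succ, List.range_succ, List.range_succ, ih]
      simp [List.flatMap_append]

theorem EprN_eq_map_scatN (r : List Nat) (b : Int) :
    EprN b r = (List.range (2 ^ r.length)).map (fun m => b + scatN m r) := by
  induction r generalizing b with
  | nil => simp [EprN, scatN]
  | cons s rest ih =>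
      have hlen : (2:Nat) ^ (s :: rest).length = 2 * 2 ^ rest.length := by
        simp [pow_succ]; ring
      rw [EprN, ih, hlen, pv_range_two_mul, List.flatMap_map, List.map_flatMap]
      apply List.flatMap_congr
      intro q _
      have h1 : (2 * q) % 2 = 0 := by omega
      have h2 : (2 * q) / 2 = q := by omega
      have h3 : (2 * q + 1) % 2 = 1 := by omega
      have h4 : (2 * q + 1) / 2 = q := by omega
      simp [scatN, h1, h2, h3, h4]
      ring

theorem EprN_double (r : List Nat) (b : Int) :
    (EprN b r).map (fun v => v * 2) = EprN (b * 2) (r.map (· + 1)) := by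
  induction r generalizing b with
  | nil => simp [EprN]
  | cons s rest ih =>
      simp only [EprN, List.map_cons, List.map_flatMap, ← ih, List.flatMap_map]
      apply List.flatMap_congr
      intro w _
      simp [pow_succ]
      ring

theorem EprN_branch (r : List Nat) (b : Int) :
    (EprN b r).flatMap (fun v => [v * 2, v * 2 + 1]) = EprN (b * 2) (0 :: r.map (· + 1)) := by
  rw [EprN, ← EprN_double, List.flatMap_map]
  simp

-- A's loop over range(2, I+1), characterised by the schedule
theorem Afold_eq (I : Nat) (hI : 1 ≤ I) :
    (PySem.List.pyRange 2 ((I:Int) + 1) 1).foldl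
      (fun (st : List Int × Nat) i =>
        if i - 1 = (2:Int) ^ st.2 then
          (st.1.map (fun v => v * 2), st.2 + 1)
        else
          (st.1.flatMap (fun v => [0, 1].map (fun a => v * 2 + a)), st.2))
      ([1], 0)
    = (EprN ((2:Int) ^ (I - 1)) (sched (I - 1)).1, (sched (I - 1)).2) := by
  induction I with
  | zero => omega
  | succ I ih =>
      by_cases hI1 : I = 0
      · subst hI1
        have hcast : ((0 + 1 : Nat) : Int) = (1:Int) := by norm_num
        rw [hcast, PySem.List.pyRange_one_eq_nil (by norm_num)]
        simp [sched, EprN]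
      · have h1 : 1 ≤ I := by omega
        have hcast : ((I + 1 : Nat) : Int) = (I:Int) + 1 := by push_cast; ring
        rw [hcast]
        have hsplit : PySem.List.pyRange 2 ((I:Int) + 1 + 1) 1
            = PySem.List.pyRange 2 ((I:Int) + 1) 1 ++ [(I:Int) + 1] := by
          exact PySem.List.pyRange_one_succ_right (by omega)
        rw [hsplit, List.foldl_append, ih h1]
        have hIk : I - 1 + 1 = I := by omega
        have hsched : sched I = sched (I - 1 + 1) := by rw [hIk]
        rw [List.foldl_cons, List.foldl_nil]
        have hpow2 : ((2:Int) ^ (sched (I - 1)).2) = ((2 ^ (sched (I - 1)).2 : Nat) : Int) := by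
          push_cast; ring
        have hcond : ((I:Int) + 1 - 1 = (2:Int) ^ (sched (I - 1)).2)
            ↔ (I = 2 ^ (sched (I - 1)).2) := by
          rw [hpow2]
          constructor
          · intro h
            have h' : (I:Int) = ((2 ^ (sched (I - 1)).2 : Nat) : Int) := by linarith
            exact_mod_cast h'
          · intro h
            have h' : (I:Int) = ((2 ^ (sched (I - 1)).2 : Nat) : Int) := by exact_mod_cast h
            linarith
        by_cases hc : (I:Int) + 1 - 1 = (2:Int) ^ (sched (I - 1)).2
        · have hc' : I = 2 ^ (sched (I - 1)).2 := (hcond).mp hc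
          rw [if_pos hc]
          simp only [Nat.succ_sub_one, hsched, sched, hIk]
          rw [if_pos hc']
          have hpow : (2:Int) ^ (I - 1) * 2 = (2:Int) ^ (I + 1 - 1) := by
            rw [show I + 1 - 1 = I - 1 + 1 by omega, pow_succ]
          simp [EprN_double, hpow]
        · have hc' : ¬ (I = 2 ^ (sched (I - 1)).2) := fun h => hc (hcond.mpr h)
          rw [if_neg hc]
          simp only [Nat.succ_sub_one, hsched, sched, hIk]
          rw [if_neg hc']
          have hpow : (2:Int) ^ (I - 1) * 2 = (2:Int) ^ (I + 1 - 1) := by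
            rw [show I + 1 - 1 = I - 1 + 1 by omega, pow_succ]
          simp [EprN_branch, hpow]

-- B's phase-1 loop, characterised by the same schedule (absolute = relative + (n - I))
theorem Bfold_eq (n : Int) (I : Nat) (hI : 1 ≤ I) :
    (PySem.List.pyRange 2 ((I:Int) + 1) 1).foldl
      (fun (sp : List Int × Int) i =>
        if i - 1 = sp.2 then (sp.1, sp.2 * 2) else (sp.1 ++ [n - i], sp.2))
      ([], 1)
    = (((sched (I - 1)).1.map (fun s : Nat => (n - (I:Int)) + (s:Int))).reverse,
       (2:Int) ^ (sched (I - 1)).2) := by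
  induction I with
  | zero => omega
  | succ I ih =>
      by_cases hI1 : I = 0
      · subst hI1
        have hcast : ((0 + 1 : Nat) : Int) = (1:Int) := by norm_num
        rw [hcast, PySem.List.pyRange_one_eq_nil (by norm_num)]
        simp [sched]
      · have h1 : 1 ≤ I := by omega
        have hcast : ((I + 1 : Nat) : Int) = (I:Int) + 1 := by push_cast; ring
        rw [hcast]
        have hsplit : PySem.List.pyRange 2 ((I:Int) + 1 + 1) 1
            = PySem.List.pyRange 2 ((I:Int) + 1) 1 ++ [(I:Int) + 1] := by
          exact PySem.List.pyRange_one_succ_right (by omega)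
        rw [hsplit, List.foldl_append, ih h1]
        have hIk : I - 1 + 1 = I := by omega
        have hsched : sched I = sched (I - 1 + 1) := by rw [hIk]
        rw [List.foldl_cons, List.foldl_nil]
        have hpow2 : ((2:Int) ^ (sched (I - 1)).2) = ((2 ^ (sched (I - 1)).2 : Nat) : Int) := by
          push_cast; ring
        have hcond : ((I:Int) + 1 - 1 = (2:Int) ^ (sched (I - 1)).2)
            ↔ (I = 2 ^ (sched (I - 1)).2) := by
          rw [hpow2]
          constructor
          · intro h
            have h' : (I:Int) = ((2 ^ (sched (I - 1)).2 : Nat) : Int) := by linarith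
            exact_mod_cast h'
          · intro h
            have h' : (I:Int) = ((2 ^ (sched (I - 1)).2 : Nat) : Int) := by exact_mod_cast h
            linarith
        by_cases hc : (I:Int) + 1 - 1 = (2:Int) ^ (sched (I - 1)).2
        · have hc' : I = 2 ^ (sched (I - 1)).2 := (hcond).mp hc
          rw [if_pos hc]
          simp only [Nat.succ_sub_one, hsched, sched, hIk]
          rw [if_pos hc']
          have hmap : (sched (I - 1)).1.map ((fun s : Nat => n - ((I:Int) + 1) + (s:Int)) ∘ (fun x => x + 1))
              = (sched (I - 1)).1.map (fun s : Nat => n - (I:Int) + (s:Int)) := by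
            apply List.map_congr_left
            intro s _
            simp only [Function.comp]
            push_cast
            ring
          simp only [Prod.mk.injEq, List.map_map, hmap]
          exact ⟨trivial, (pow_succ 2 (sched (I - 1)).2).symm⟩
        · have hc' : ¬ (I = 2 ^ (sched (I - 1)).2) := fun h => hc (hcond.mpr h)
          rw [if_neg hc]
          simp only [Nat.succ_sub_one, hsched, sched, hIk]
          rw [if_neg hc']
          have hmap : (sched (I - 1)).1.map ((fun s : Nat => n - ((I:Int) + 1) + (s:Int)) ∘ (fun x => x + 1))
              = (sched (I - 1)).1.map (fun s : Nat => n - (I:Int) + (s:Int)) := by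
            apply List.map_congr_left
            intro s _
            simp only [Function.comp]
            push_cast
            ring
          simp only [Prod.mk.injEq, List.map_cons, List.reverse_cons, List.map_map, hmap]
          simp

-- B's inner scatter loop computes b + scatN
theorem Bscat_eq (r : List Nat) (b : Int) (m : Nat) :
    ((r.map (fun s : Nat => (s:Int))).foldl
      (fun (t : Int × Int) sig =>
        (if PySem.Int.mod t.2 2 = 1 then t.1 + (1 <<< sig.toNat) else t.1,
         PySem.Int.floordiv t.2 2))
      (b, (m:Nat))).1 = b + scatN m r := by
  induction r generalizing b m with
  | nil => simp [scatN]
  | cons s rest ih =>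
      simp only [List.map_cons, List.foldl_cons]
      have hmod : PySem.Int.mod ((m:Nat):Int) 2 = ((m % 2 : Nat) : Int) := by
        exact_mod_cast PySem.Int.mod_natCast m 2
      have hdiv : PySem.Int.floordiv ((m:Nat):Int) 2 = ((m / 2 : Nat) : Int) := by
        exact_mod_cast PySem.Int.floordiv_natCast m 2
      rw [hmod, hdiv]
      by_cases h : m % 2 = 1
      · rw [if_pos (by exact_mod_cast h), ih]
        simp [scatN, h, Nat.one_shiftLeft]
        ring
      · rw [if_neg (by intro hh; apply h; exact_mod_cast hh), ih]
        have h0 : m % 2 = 0 := by omega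
        simp [scatN, h0]

theorem one_shiftLeft_int (k : Nat) : ((1 <<< k : Nat) : Int) = ((2 ^ k : Nat) : Int) := by
  rw [Nat.one_shiftLeft]

-- ===== VERDICT (by name: the statement is the Claim_ definition above) =====
theorem pseq_spec : Claim_equal_pseq := by
  intro n _
  unfold Spec_pseq
  by_cases h0 : n = 0
  · simp [pseq, pseq_alt, h0]
  by_cases hlt : n < 2
  · -- fewer than two steps: A's loop body never runs, both return [1]
    rw [pseq, pseq_alt, if_neg h0, if_neg h0, if_pos hlt]
    rcases eq_or_ne n 1 with h | h
    · rw [if_pos h]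
    · rw [if_neg h, PySem.List.pyRange_one_eq_nil (by omega)]
      rfl
  have h1 : ¬ n = 1 := by omega
  rw [pseq, pseq_alt, if_neg h0, if_neg h1, if_neg h0, if_neg (by omega : ¬ n < 2)]
  have h2 : 2 ≤ n := by omega
  set I : Nat := n.toNat with hIdef
  have hnI : (I:Int) = n := by omega
  have hI1 : 1 ≤ I := by omega
  rw [← hnI]
  rw [Afold_eq I hI1, Bfold_eq ((I:Int)) I hI1]
  simp only [sub_self, zero_add]
  set r : List Nat := (sched (I - 1)).1 with hr
  rw [EprN_eq_map_scatN]
  -- turn B's outer fold into a map over List.range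
  have hbase : (((1 <<< ((I:Int) - 1).toNat : Nat)) : Int) = (2:Int) ^ (I - 1) := by
    rw [Nat.one_shiftLeft]
    have h' : ((I:Int) - 1).toNat = I - 1 := by omega
    rw [h']; push_cast; ring
  simp only [List.reverse_reverse, List.length_reverse, List.length_map]
  rw [one_shiftLeft_int r.length, PySem.List.pyRange_zero_natCast,
      PySem.List.foldl_append_singleton_eq_map, List.map_map]
  simp only [List.nil_append]
  apply List.map_congr_left
  intro m _
  simp only [Function.comp]
  rw [Bscat_eq r _ m, hbase]
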